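-- pv_equiv track=rewrite | github.com/JaneliaSciComp/sequence-clustering | src/sequence_clustering/levenshtein.py | _levenshtein_check_2
-- ===== SOURCE A (Python) =====
-- def _levenshtein_check_2(a: str, b: str) -> bool:
--     """
--     Optimized implementation to check if Levenshtein distance <= 2.
--
--     :param a: First string.
--     :param b: Second string.
--     """
--     n, m = len(a), len(b)
--
--     # Quick length check
--     if abs(n - m) > 2:
--         return False
--
--     # Handle edge cases
--     if n == 0:
--         return m <= 2
--     if m == 0:
--         return n <= 2
--
--     # Use standard DP approach with early termination
--     prev = list(range(m + 1))
--
--     for i in range(1, n + 1):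
--         curr = [i]
--
--         for j in range(1, m + 1):
--             if a[i - 1] == b[j - 1]:
--                 cost = prev[j - 1]
--             else:
--                 cost = 1 + min(
--                     prev[j],  # deletion
--                     curr[j - 1],  # insertion
--                     prev[j - 1],  # substitution
--                 )
--             curr.append(cost)
--
--         # Early termination if all values > 2
--         if min(curr) > 2:
--             return False
--
--         prev = curr
--
--     return prev[m] <= 2
-- ===== SOURCE B (Python) =====
-- def _levenshtein_check_2(a: str, b: str) -> bool:
--     """Bounded-distance recursion: strip the common suffix, then branch on the
--     three edit operations with a budget of 2.  O(len) instead of the full DP table."""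
--
--     def go(i: int, j: int, k: int) -> bool:
--         # strip common suffix of a[:i] and b[:j]
--         while i > 0 and j > 0 and a[i - 1] == b[j - 1]:
--             i -= 1
--             j -= 1
--         if i == 0:
--             return j <= k
--         if j == 0:
--             return i <= k
--         if k == 0:
--             return False
--         return (go(i - 1, j, k - 1)      # delete a's last char
--                 or go(i, j - 1, k - 1)   # insert b's last char
--                 or go(i - 1, j - 1, k - 1))  # substitute
--
--     return go(len(a), len(b), 2)
-- ===== Notes on version B (the rewrite author's own statement) =====
-- stated objective: faster
-- what changed: Replaced the full O(n*m) dynamic-programming table with a bounded-budget recursion that strips the common suffix and branches on the three edit operations with budget 2 (at most 13 calls, each a linear suffix scan).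
import Mathlib
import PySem

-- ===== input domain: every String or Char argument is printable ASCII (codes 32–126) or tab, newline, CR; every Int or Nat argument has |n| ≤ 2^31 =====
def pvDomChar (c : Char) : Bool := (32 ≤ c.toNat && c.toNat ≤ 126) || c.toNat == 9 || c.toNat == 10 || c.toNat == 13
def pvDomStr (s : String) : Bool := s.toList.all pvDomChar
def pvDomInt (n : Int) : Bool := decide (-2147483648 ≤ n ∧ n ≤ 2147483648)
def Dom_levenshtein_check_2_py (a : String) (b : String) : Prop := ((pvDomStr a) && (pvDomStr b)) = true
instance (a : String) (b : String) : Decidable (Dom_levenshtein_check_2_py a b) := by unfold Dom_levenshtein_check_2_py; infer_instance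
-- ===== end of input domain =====

-- B is a bounded-budget recursion (strip common suffix, branch on the three edits with budget 2),
-- O(n) instead of A's full O(n·m) DP table; return values proved equal on all inputs.

-- ===== PORT A =====
-- inner loop `for j in range(1, m+1)`: walks b's chars; pj1 = prev[j-1], prest = prev[j:], last = curr[j-1]
def pvInner (c : Char) : List Char → Nat → List Nat → Nat → List Nat
  | [], _, _, _ => []
  | y :: bs, pj1, prest, last =>
      let pj := prest.headD 0
      let cost := if c = y then pj1 else 1 + min pj (min last pj1)
      cost :: pvInner c bs pj prest.tail cost

-- outer loop `for i in range(1, n+1)`: walks a's chars; `none` = the early `return False`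
def pvOuter (bl : List Char) : List Char → Nat → List Nat → Option (List Nat)
  | [], _, prev => some prev
  | c :: as, i, prev =>
      let rest := pvInner c bl (prev.headD 0) prev.tail i
      if 2 < rest.foldl min i then none          -- min(curr) with curr = i :: rest
      else pvOuter bl as (i + 1) (i :: rest)

def levenshtein_check_2_py (a : String) (b : String) : Bool :=
  let al := a.toList
  let bl := b.toList
  let n := al.length
  let m := bl.length
  if 2 < ((n : Int) - (m : Int)).natAbs then false
  else if n = 0 then decide (m ≤ 2)
  else if m = 0 then decide (n ≤ 2)
  else
    match pvOuter bl al 1 (List.range (m + 1)) with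
    | none => false
    | some prev => decide (prev.getD m 0 ≤ 2)

-- ===== PORT B =====
-- Source B's `while i and j and a[i-1] == b[j-1]` on reversed lists (a[-1]/a[:-1] become head/tail; exact)
def pvStrip : List Char → List Char → List Char × List Char
  | x :: xs, y :: ys => if x = y then pvStrip xs ys else (x :: xs, y :: ys)
  | xs, ys => (xs, ys)

-- Source B's `go(i, j, k)`; arguments are the reversed remaining prefixes a[:i], b[:j]
def pvGo (k : Nat) (ra rb : List Char) : Bool :=
  match k, pvStrip ra rb with
  | k, ([], b') => decide (b'.length ≤ k)
  | k, (_ :: a', []) => decide (a'.length + 1 ≤ k)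
  | 0, (_ :: _, _ :: _) => false
  | k + 1, (x :: a', y :: b') =>
      pvGo k a' (y :: b') || pvGo k (x :: a') b' || pvGo k a' b'
termination_by k

def levenshtein_check_2_py_alt (a : String) (b : String) : Bool :=
  pvGo 2 a.toList.reverse b.toList.reverse

-- ===== PRECONDITION & SPEC =====
def Spec_levenshtein_check_2_py (a : String) (b : String) (out : Bool) : Prop := out = levenshtein_check_2_py_alt a b
instance (a : String) (b : String) (out : Bool) : Decidable (Spec_levenshtein_check_2_py a b out) := by unfold Spec_levenshtein_check_2_py; infer_instance

-- ===== CLAIM (what is proved, stated in full; the proofs are below) =====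
def Claim_equal_levenshtein_check_2_py : Prop := ∀ (a : String) (b : String), Dom_levenshtein_check_2_py a b → Spec_levenshtein_check_2_py a b (levenshtein_check_2_py a b)

-- ===== LEMMAS AND PROOFS =====

-- the common yardstick: Levenshtein distance by head recursion (both ports get reversed lists)
def pvLev : List Char → List Char → Nat
  | [], ys => ys.length
  | _ :: xs, [] => xs.length + 1
  | x :: xs, y :: ys =>
      if x = y then pvLev xs ys
      else 1 + min (pvLev xs (y :: ys)) (min (pvLev (x :: xs) ys) (pvLev xs ys))
termination_by xs ys => xs.length + ys.length
decreasing_by all_goals simp <;> omega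

theorem pvLev_nil_right (x : List Char) : pvLev x [] = x.length := by
  cases x <;> simp [pvLev]

theorem pvStrip_lev : ∀ ra rb, pvLev (pvStrip ra rb).1 (pvStrip ra rb).2 = pvLev ra rb := by
  intro ra
  induction ra with
  | nil => intro rb; cases rb <;> simp [pvStrip]
  | cons x xs ih =>
    intro rb
    cases rb with
    | nil => simp [pvStrip]
    | cons y ys =>
      by_cases h : x = y
      · subst h; simp [pvStrip, pvLev, ih]
      · simp [pvStrip, h]

theorem pvStrip_shape : ∀ ra rb, (pvStrip ra rb).1 = [] ∨ (pvStrip ra rb).2 = [] ∨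
    (∃ x a' y b', pvStrip ra rb = (x :: a', y :: b') ∧ x ≠ y) := by
  intro ra
  induction ra with
  | nil => intro rb; cases rb <;> simp [pvStrip]
  | cons x xs ih =>
    intro rb
    cases rb with
    | nil => simp [pvStrip]
    | cons y ys =>
      by_cases h : x = y
      · subst h; simpa [pvStrip] using ih ys
      · right; right; exact ⟨x, xs, y, ys, by simp [pvStrip, h], h⟩

theorem pvGo_spec : ∀ k ra rb, pvGo k ra rb = decide (pvLev ra rb ≤ k) := by
  intro k
  induction k with
  | zero =>
    intro ra rb
    rcases pvStrip_shape ra rb with h | h | ⟨x, a', y, b', h, hxy⟩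
    · have h2 : pvStrip ra rb = ([], (pvStrip ra rb).2) := by
        cases hs : pvStrip ra rb; simp_all
      rw [pvGo.eq_def, h2]
      have := pvStrip_lev ra rb
      rw [h2] at this
      simp [pvLev] at this
      simp [← this]
    · rcases hs : pvStrip ra rb with ⟨a1, b1⟩
      have hb : b1 = [] := by rw [hs] at h; exact h
      subst hb
      have := pvStrip_lev ra rb
      rw [hs] at this
      cases a1 with
      | nil => rw [pvGo.eq_def, hs]; simp [pvLev] at this; simp [← this]
      | cons u us => rw [pvGo.eq_def, hs]; simp [pvLev] at this; simp [← this]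
    · rw [pvGo.eq_def, h]
      have := pvStrip_lev ra rb
      rw [h] at this
      simp only [pvLev, if_neg hxy] at this
      have : 0 < pvLev ra rb := by omega
      simp; omega
  | succ k ih =>
    intro ra rb
    rcases pvStrip_shape ra rb with h | h | ⟨x, a', y, b', h, hxy⟩
    · have h2 : pvStrip ra rb = ([], (pvStrip ra rb).2) := by
        cases hs : pvStrip ra rb; simp_all
      rw [pvGo.eq_def, h2]
      have := pvStrip_lev ra rb
      rw [h2] at this
      simp [pvLev] at this
      simp [← this]
    · rcases hs : pvStrip ra rb with ⟨a1, b1⟩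
      have hb : b1 = [] := by rw [hs] at h; exact h
      subst hb
      have := pvStrip_lev ra rb
      rw [hs] at this
      cases a1 with
      | nil => rw [pvGo.eq_def, hs]; simp [pvLev] at this; simp [← this]
      | cons u us => rw [pvGo.eq_def, hs]; simp [pvLev] at this; simp [← this]
    · rw [pvGo.eq_def, h]
      have hlev := pvStrip_lev ra rb
      rw [h] at hlev
      simp only [pvLev, if_neg hxy] at hlev
      show (pvGo k a' (y :: b') || pvGo k (x :: a') b' || pvGo k a' b')
          = decide (pvLev ra rb ≤ k + 1)
      rw [ih, ih, ih, ← hlev]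
      have h1 : (1 + min (pvLev a' (y :: b')) (min (pvLev (x :: a') b') (pvLev a' b')) ≤ k + 1)
          ↔ (pvLev a' (y :: b') ≤ k ∨ pvLev (x :: a') b' ≤ k ∨ pvLev a' b' ≤ k) := by
        have h2 : ∀ m : Nat, (1 + m ≤ k + 1) ↔ m ≤ k := fun m => by omega
        rw [h2]
        simp
      simp [h1, Bool.or_assoc]

-- the (reversed) row entries for x beyond column 0: pvRowE x rb bs lists pvLev x (rev prefix) for the columns of bs
def pvRowE (x : List Char) : List Char → List Char → List Nat
  | _, [] => []
  | rb, y :: bs => pvLev x (y :: rb) :: pvRowE x (y :: rb) bs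

theorem pvInner_spec (c : Char) (ra : List Char) : ∀ bs rb,
    pvInner c bs (pvLev ra rb) (pvRowE ra rb bs) (pvLev (c :: ra) rb) = pvRowE (c :: ra) rb bs := by
  intro bs
  induction bs with
  | nil => intro rb; simp [pvInner, pvRowE]
  | cons y bs ih =>
    intro rb
    have hcost : (if c = y then pvLev ra rb
        else 1 + min (pvLev ra (y :: rb)) (min (pvLev (c :: ra) rb) (pvLev ra rb)))
        = pvLev (c :: ra) (y :: rb) := by
      rw [pvLev]
    simp only [pvRowE, pvInner, List.headD_cons, List.tail_cons]
    rw [hcost, ih (y :: rb)]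

theorem pvRowE_nil : ∀ bs rb, pvRowE [] rb bs = List.range' (rb.length + 1) bs.length := by
  intro bs
  induction bs with
  | nil => intro rb; simp [pvRowE]
  | cons y bs ih =>
    intro rb
    simp [pvRowE, pvLev, List.range'_succ, ih (y :: rb)]

theorem pvRowE_getD_last : ∀ bs rb x, bs ≠ [] →
    (pvRowE x rb bs).getD (bs.length - 1) 0 = pvLev x (bs.reverse ++ rb) := by
  intro bs
  induction bs with
  | nil => simp
  | cons y bs ih =>
    intro rb x _
    cases bs with
    | nil => simp [pvRowE]
    | cons z bs' =>
      have h := ih (y :: rb) x (by simp)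
      simp only [pvRowE, List.length_cons] at h ⊢
      rw [show bs'.length + 1 + 1 - 1 = bs'.length + 1 from rfl, List.getD_cons_succ]
      rw [show bs'.length + 1 - 1 = bs'.length from rfl] at h
      rw [h]
      simp

theorem pvRowE_mem : ∀ bs rb (x : List Char) j, j < bs.length →
    pvLev x ((bs.take (j + 1)).reverse ++ rb) ∈ pvRowE x rb bs := by
  intro bs
  induction bs with
  | nil => simp
  | cons y bs ih =>
    intro rb x j hj
    cases j with
    | zero => simp [pvRowE]
    | succ j =>
      have h := ih (y :: rb) x j (by simpa using hj)
      simp only [List.take_succ_cons, List.reverse_cons, List.append_assoc, List.cons_append,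
        List.nil_append]
      exact List.mem_cons_of_mem _ h

theorem pvFold_le_init : ∀ (l : List Nat) i, List.foldl min i l ≤ i := by
  intro l
  induction l with
  | nil => simp
  | cons x l ih =>
    intro i
    calc List.foldl min (min i x) l ≤ min i x := ih _
    _ ≤ i := min_le_left _ _

theorem pvFold_le_mem : ∀ (l : List Nat) i x, x ∈ l → List.foldl min i l ≤ x := by
  intro l
  induction l with
  | nil => simp
  | cons y l ih =>
    intro i x hx
    rcases List.mem_cons.mp hx with h | h
    · subst h
      calc List.foldl min (min i x) l ≤ min i x := pvFold_le_init _ _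
      _ ≤ x := min_le_right _ _
    · exact ih _ _ h

theorem pvMono (bl : List Char) (c : Char) (x : List Char) : ∀ j, j ≤ bl.length →
    ∃ j', j' ≤ bl.length ∧ pvLev x ((bl.take j').reverse) ≤ pvLev (c :: x) ((bl.take j).reverse) := by
  intro j
  induction j with
  | zero =>
    intro _
    exact ⟨0, Nat.zero_le _, by simp [pvLev_nil_right]⟩
  | succ j ih =>
    intro hj
    have hjlt : j < bl.length := hj
    have htake : (bl.take (j + 1)).reverse = bl[j] :: (bl.take j).reverse := by
      rw [List.take_succ_eq_append_getElem hjlt]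
      simp
    by_cases hc : c = bl[j]
    · refine ⟨j, Nat.le_of_lt hjlt, ?_⟩
      rw [htake, pvLev, if_pos hc]
    · rw [htake]
      rw [show pvLev (c :: x) (bl[j] :: (bl.take j).reverse)
            = 1 + min (pvLev x (bl[j] :: (bl.take j).reverse))
                (min (pvLev (c :: x) ((bl.take j).reverse)) (pvLev x ((bl.take j).reverse)))
          from by rw [pvLev, if_neg hc]]
      rcases min_choice (pvLev x (bl[j] :: (bl.take j).reverse))
          (min (pvLev (c :: x) ((bl.take j).reverse)) (pvLev x ((bl.take j).reverse))) with hm | hm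
      · exact ⟨j + 1, hj, by rw [htake, hm]; omega⟩
      · rcases min_choice (pvLev (c :: x) ((bl.take j).reverse))
            (pvLev x ((bl.take j).reverse)) with hm2 | hm2
        · obtain ⟨j', hj', hle⟩ := ih (Nat.le_of_lt hjlt)
          exact ⟨j', hj', by rw [hm, hm2]; omega⟩
        · exact ⟨j, Nat.le_of_lt hjlt, by rw [hm, hm2]; omega⟩

theorem pvChain (bl : List Char) : ∀ (as x : List Char),
    ∃ j, j ≤ bl.length ∧ pvLev x ((bl.take j).reverse) ≤ pvLev (as.reverse ++ x) bl.reverse := by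
  intro as
  induction as with
  | nil =>
    intro x
    exact ⟨bl.length, le_refl _, by simp⟩
  | cons c as ih =>
    intro x
    obtain ⟨j, hj, hle⟩ := ih (c :: x)
    obtain ⟨j', hj', hle'⟩ := pvMono bl c x j hj
    refine ⟨j', hj', ?_⟩
    have hrw : (c :: as).reverse ++ x = as.reverse ++ (c :: x) := by simp
    rw [hrw]
    exact le_trans hle' hle

theorem pvOuter_spec (bl : List Char) : ∀ (as x : List Char),
    (match pvOuter bl as (x.length + 1) (x.length :: pvRowE x [] bl) with
     | none => false
     | some prev => decide (prev.getD bl.length 0 ≤ 2))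
    = decide (pvLev (as.reverse ++ x) bl.reverse ≤ 2) := by
  intro as
  induction as with
  | nil =>
    intro x
    simp only [pvOuter, List.reverse_nil, List.nil_append]
    cases bl with
    | nil => simp [pvLev_nil_right]
    | cons w bl' =>
      have h := pvRowE_getD_last (w :: bl') [] x (by simp)
      simp only [List.length_cons, Nat.add_sub_cancel] at h
      simp only [List.length_cons, List.getD_cons_succ, h]
      simp
  | cons c as ih =>
    intro x
    have hhead : (List.headD (x.length :: pvRowE x [] bl) 0) = pvLev x [] := by
      simp [pvLev_nil_right]
    have hlast : x.length + 1 = pvLev (c :: x) [] := by simp [pvLev_nil_right]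
    have hrest : pvInner c bl ((x.length :: pvRowE x [] bl).headD 0)
        (x.length :: pvRowE x [] bl).tail (x.length + 1) = pvRowE (c :: x) [] bl := by
      rw [List.tail_cons, hhead, hlast]
      exact pvInner_spec c x bl []
    simp only [pvOuter, hrest]
    by_cases hexit : 2 < (pvRowE (c :: x) [] bl).foldl min (x.length + 1)
    · rw [if_pos hexit]
      have hfin : 2 < pvLev (as.reverse ++ (c :: x)) bl.reverse := by
        obtain ⟨j, hj, hle⟩ := pvChain bl as (c :: x)
        have hfold : (pvRowE (c :: x) [] bl).foldl min (x.length + 1)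
            ≤ pvLev (c :: x) ((bl.take j).reverse) := by
          cases j with
          | zero =>
            simpa [pvLev_nil_right] using pvFold_le_init (pvRowE (c :: x) [] bl) (x.length + 1)
          | succ j =>
            have hmem := pvRowE_mem bl [] (c :: x) j hj
            simpa using pvFold_le_mem _ _ _ hmem
        omega
      rw [show (c :: as).reverse ++ x = as.reverse ++ (c :: x) by simp]
      have hnot : ¬ (pvLev (as.reverse ++ (c :: x)) bl.reverse ≤ 2) := by omega
      simp [hnot]
    · rw [if_neg hexit]
      have := ih (c :: x)
      simp only [List.length_cons] at this
      rw [show (c :: as).reverse ++ x = as.reverse ++ (c :: x) by simp]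
      exact this

theorem pvLev_length : ∀ x y : List Char, x.length ≤ pvLev x y + y.length ∧ y.length ≤ pvLev x y + x.length := by
  intro x y
  induction x, y using pvLev.induct with
  | case1 ys => simp [pvLev]
  | case2 x xs => simp [pvLev]
  | case3 xs y ys ih =>
    rw [pvLev, if_pos rfl]
    simp only [List.length_cons]
    omega
  | case4 x xs y ys hne ih1 ih2 ih3 =>
    rw [pvLev, if_neg hne]
    simp only [List.length_cons]
    rcases min_choice (pvLev xs (y :: ys)) (min (pvLev (x :: xs) ys) (pvLev xs ys)) with hm | hm <;>
      rcases min_choice (pvLev (x :: xs) ys) (pvLev xs ys) with hm2 | hm2 <;>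
      simp only [List.length_cons] at ih1 ih2 ih3 <;> omega

theorem portA_spec (a b : String) :
    levenshtein_check_2_py a b = decide (pvLev a.toList.reverse b.toList.reverse ≤ 2) := by
  show (if 2 < ((a.toList.length : Int) - (b.toList.length : Int)).natAbs then false
    else if a.toList.length = 0 then decide (b.toList.length ≤ 2)
    else if b.toList.length = 0 then decide (a.toList.length ≤ 2)
    else match pvOuter b.toList a.toList 1 (List.range (b.toList.length + 1)) with
      | none => false
      | some prev => decide (prev.getD b.toList.length 0 ≤ 2)) = _
  have hlen := pvLev_length a.toList.reverse b.toList.reverse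
  simp only [List.length_reverse] at hlen
  split_ifs with h1 h2 h3
  · have : ¬ (pvLev a.toList.reverse b.toList.reverse ≤ 2) := by omega
    simp [this]
  · have ha : a.toList = [] := List.length_eq_zero_iff.mp h2
    rw [ha]
    simp [pvLev]
  · have hb : b.toList = [] := List.length_eq_zero_iff.mp h3
    rw [hb]
    simp [pvLev_nil_right]
  · have hrange : List.range (b.toList.length + 1)
        = (([] : List Char)).length :: pvRowE [] [] b.toList := by
      rw [pvRowE_nil b.toList []]
      rw [List.range_eq_range', List.range'_succ]
      simp
    rw [hrange, show (1 : Nat) = ([] : List Char).length + 1 by simp]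
    have := pvOuter_spec b.toList a.toList []
    simpa using this

-- ===== VERDICT (by name: the statement is the Claim_ definition above) =====
theorem levenshtein_check_2_py_spec : Claim_equal_levenshtein_check_2_py := by
  intro a b _
  unfold Spec_levenshtein_check_2_py levenshtein_check_2_py_alt
  rw [portA_spec, pvGo_spec]
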